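-- pv_equiv track=rewrite | github.com/roe-dl/weewx-precipmeter | bin/user/precipmeter.py | get_w1w2_from_ww
-- ===== SOURCE A (Python) =====
-- def get_w1w2_from_ww(ww_list):
--     """ get the past weather codes from a list of table 4677 weather codes
--
--         Args:
--             ww_list (iterator of int): list of weather ww codes
--
--         Returns:
--             int: W past weather code of the present weather
--             int: W1 past weather code
--             int: W2 past weather code
--     """
--     w_list = []
--     last_w = None
--     # loop through the list from now to the past
--     for ww in reversed(ww_list):
--         if ww is None:
--             w = None
--         elif ww==90:
--             w = 8
--         elif ww<30:
--             w = None
--         else: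
--             w = ww//10
--         if last_w!=w:
--             w_list.append(w)
--         last_w = w
--     if not w_list: return None,None,None
--     # The present weather ist the first element in the list. We want
--     # the past weather.
--     w = sorted(set(w_list[1:]),key=lambda x:-1 if x is None else x)
--     if not w: return w_list[0],None,None
--     try:
--         w1 = w[-1]
--     except (LookupError,TypeError):
--         w1 = None
--     try:
--         w2 = w[-2]
--     except LookupError:
--         w2 = None
--     return w_list[0], w1, w2
-- ===== SOURCE B (Python) =====
-- def get_w1w2_from_ww(ww_list):
--     """ get the past weather codes from a list of table 4677 weather codes """
--     def to_w(ww):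
--         if ww is None or ww < 30:
--             return None
--         if ww == 90:
--             return 8
--         return ww // 10
--     ws = [to_w(ww) for ww in reversed(ww_list)]
--     i = 0
--     n = len(ws)
--     while i < n and ws[i] is None:
--         i += 1
--     if i == n:
--         return None, None, None
--     w0 = ws[i]
--     while i < n and ws[i] == w0:
--         i += 1
--     rest = sorted(set(ws[i:]), key=lambda x: -1 if x is None else x)
--     w1 = rest[-1] if len(rest) >= 1 else None
--     w2 = rest[-2] if len(rest) >= 2 else None
--     return w0, w1, w2
-- ===== Notes on version B (the rewrite author's own statement) =====
-- stated objective: simpler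
-- what changed: B drops A's run-compressed accumulator list entirely: it maps the reversed codes once, scans for the first non-None value (W), skips its run, and takes the top two of the set of the remaining mapped values, instead of building w_list via consecutive-duplicate suppression and slicing/sorting it.
import Mathlib
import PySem

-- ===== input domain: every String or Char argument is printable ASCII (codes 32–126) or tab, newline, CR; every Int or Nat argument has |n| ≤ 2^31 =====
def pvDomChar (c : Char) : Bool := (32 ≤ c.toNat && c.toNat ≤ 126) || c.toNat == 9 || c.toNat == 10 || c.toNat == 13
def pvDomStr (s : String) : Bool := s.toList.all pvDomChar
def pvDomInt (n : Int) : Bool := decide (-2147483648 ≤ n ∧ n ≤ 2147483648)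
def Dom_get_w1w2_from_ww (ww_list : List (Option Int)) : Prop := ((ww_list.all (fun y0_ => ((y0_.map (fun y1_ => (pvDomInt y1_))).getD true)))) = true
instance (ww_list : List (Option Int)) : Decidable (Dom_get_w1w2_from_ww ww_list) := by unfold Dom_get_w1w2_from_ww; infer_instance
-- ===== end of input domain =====

-- B replaces A's run-compressed accumulator list with a direct scan (first non-None mapped
-- value, skip its run, top-two of the remaining set); objective: simpler decomposition.

-- the sort key 'lambda x: -1 if x is None else x' used by both programs
def pvKey : Option Int → Int := fun x => match x with | none => -1 | some v => v

-- ===== PORT A =====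
def get_w1w2_from_ww (ww_list : List (Option Int)) : Option Int × Option Int × Option Int :=
  -- loop 'for ww in reversed(ww_list)' carrying (w_list, last_w)
  let st := ww_list.reverse.foldl
    (fun (st : List (Option Int) × Option Int) ww =>
      let w : Option Int :=
        match ww with
        | none => none
        | some v => if v = 90 then some 8 else if v < 30 then none else some (PySem.Int.floordiv v 10)
      (if st.2 ≠ w then st.1 ++ [w] else st.1, w))
    ([], none)
  if st.1 = [] then (none, none, none) else
  let w := PySem.List.sorted (PySem.Set.ofList (st.1.drop 1)) pvKey false
  if w = [] then (st.1.headD none, none, none) else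
  -- try w[-1] / w[-2]: IndexError is 'none' from pyGet?, caught as w1/w2 = None
  let w1 := (PySem.List.pyGet? w (-1)).join
  let w2 := (PySem.List.pyGet? w (-2)).join
  (st.1.headD none, w1, w2)

-- ===== PORT B =====
def pvToW (ww : Option Int) : Option Int :=
  match ww with
  | none => none
  | some v => if v < 30 then none else if v = 90 then some 8 else some (PySem.Int.floordiv v 10)

def get_w1w2_from_ww_alt (ww_list : List (Option Int)) : Option Int × Option Int × Option Int :=
  let ws := ww_list.reverse.map pvToW
  -- while i < n and ws[i] is None: i += 1
  match ws.dropWhile (fun x => x == none) with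
  | [] => (none, none, none)
  | w0 :: t =>
    -- while i < n and ws[i] == w0: i += 1   (starts on the w0 just found)
    let rest := PySem.List.sorted (PySem.Set.ofList (t.dropWhile (fun x => x == w0))) pvKey false
    let w1 := if 1 ≤ rest.length then (PySem.List.pyGet? rest (-1)).join else none
    let w2 := if 2 ≤ rest.length then (PySem.List.pyGet? rest (-2)).join else none
    (w0, w1, w2)

-- ===== PRECONDITION & SPEC =====
def Spec_get_w1w2_from_ww (ww_list : List (Option Int)) (out : Option Int × Option Int × Option Int) : Prop := out = get_w1w2_from_ww_alt ww_list
instance (ww_list : List (Option Int)) (out : Option Int × Option Int × Option Int) : Decidable (Spec_get_w1w2_from_ww ww_list out) := by unfold Spec_get_w1w2_from_ww; infer_instance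

-- ===== CLAIM (what is proved, stated in full; the proofs are below) =====
def Claim_equal_get_w1w2_from_ww : Prop := ∀ (ww_list : List (Option Int)), Dom_get_w1w2_from_ww ww_list → Spec_get_w1w2_from_ww ww_list (get_w1w2_from_ww ww_list)

-- ===== LEMMAS AND PROOFS =====

-- run-length compression with a 'previous value' seed: what A's loop appends
def pvRunDedup (last : Option Int) : List (Option Int) → List (Option Int)
  | [] => []
  | x :: xs => if x = last then pvRunDedup last xs else x :: pvRunDedup x xs

-- last element with default: A's final last_w (only the first component matters below)
def pvLastD (d : Option Int) : List (Option Int) → Option Int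
  | [] => d
  | x :: xs => pvLastD x xs

lemma pvFoldA (l : List (Option Int)) : ∀ (acc : List (Option Int)) (last : Option Int),
    l.foldl (fun (st : List (Option Int) × Option Int) w =>
      (if st.2 ≠ w then st.1 ++ [w] else st.1, w)) (acc, last)
      = (acc ++ pvRunDedup last l, pvLastD last l) := by
  induction l with
  | nil => simp [pvRunDedup, pvLastD]
  | cons x xs ih =>
    intro acc last
    rw [List.foldl_cons]
    by_cases h : last = x
    · rw [show ((if last ≠ x then acc ++ [x] else acc, x) : List (Option Int) × Option Int)
            = (acc, x) from by simp [h], ih]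
      simp [pvRunDedup, pvLastD, h]
    · rw [show ((if last ≠ x then acc ++ [x] else acc, x) : List (Option Int) × Option Int)
            = (acc ++ [x], x) from by simp [h], ih]
      have h2 : ¬ x = last := fun hh => h hh.symm
      simp [pvRunDedup, pvLastD, h2]

lemma pvRunDedup_eq (l : List (Option Int)) : ∀ (last : Option Int),
    pvRunDedup last l = match l.dropWhile (fun x => x == last) with
      | [] => []
      | x :: t => x :: pvRunDedup x t := by
  induction l with
  | nil => intro last; simp [pvRunDedup]
  | cons x xs ih =>
    intro last
    by_cases h : x = last
    · simp [pvRunDedup, h, ih]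
    · simp [pvRunDedup, h]

lemma pvMem_runDedup (l : List (Option Int)) : ∀ (last y : Option Int),
    y ∈ pvRunDedup last l ↔ y ∈ l.dropWhile (fun x => x == last) := by
  induction l with
  | nil => intro last y; simp [pvRunDedup]
  | cons x xs ih =>
    intro last y
    by_cases h : x = last
    · simp [pvRunDedup, h, ih]
    · have hb : (x == last) = false := by simpa using h
      rw [show pvRunDedup last (x :: xs) = x :: pvRunDedup x xs from by simp [pvRunDedup, h],
          List.dropWhile_cons, hb]
      simp only [Bool.false_eq_true, if_false, List.mem_cons, ih]
      constructor
      · rintro (rfl | hy)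
        · exact Or.inl rfl
        · exact Or.inr ((List.dropWhile_sublist _).subset hy)
      · rintro (rfl | hy)
        · exact Or.inl rfl
        · by_cases hx : y ∈ xs.dropWhile (fun z => z == x)
          · exact Or.inr hx
          · left
            have hsplit := List.takeWhile_append_dropWhile (p := fun z => z == x) (l := xs)
            rw [← hsplit] at hy
            rcases List.mem_append.mp hy with h1 | h1
            · have := List.mem_takeWhile_imp h1
              simpa using this
            · exact absurd h1 hx

-- every mapped value is None or a nonnegative code, so pvKey is injective on them
def pvShape (x : Option Int) : Prop := x = none ∨ ∃ v, x = some v ∧ 0 ≤ v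

lemma pvToW_shape (ww : Option Int) : pvShape (pvToW ww) := by
  rcases ww with _ | v
  · exact Or.inl rfl
  · simp only [pvToW, pvShape]
    split_ifs with h1 h2
    · exact Or.inl rfl
    · exact Or.inr ⟨8, rfl, by norm_num⟩
    · refine Or.inr ⟨PySem.Int.floordiv v 10, rfl, ?_⟩
      rw [PySem.Int.floordiv_eq_ediv_of_pos (by norm_num)]
      exact Int.ediv_nonneg (by omega) (by norm_num)

lemma pvKey_inj {a b : Option Int} (ha : pvShape a) (hb : pvShape b)
    (h : pvKey a = pvKey b) : a = b := by
  rcases ha with rfl | ⟨v, rfl, hv⟩ <;> rcases hb with rfl | ⟨w, rfl, hw⟩ <;>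
    simp [pvKey] at h ⊢ <;> omega

lemma pvSorted_set_eq (L1 L2 : List (Option Int))
    (hmem : ∀ y, y ∈ L1 ↔ y ∈ L2)
    (hsh : ∀ y ∈ L2, pvShape y) :
    PySem.List.sorted (PySem.Set.ofList L1) pvKey false
      = PySem.List.sorted (PySem.Set.ofList L2) pvKey false := by
  set S2 := PySem.List.sorted (PySem.Set.ofList L2) pvKey false with hS2
  have hperm2 : S2.Perm (PySem.Set.ofList L2) := PySem.List.sorted_perm _ _ _
  have hnd2 : S2.Nodup := hperm2.nodup_iff.mpr (PySem.Set.nodup_ofList L2)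
  have hperm : S2.Perm (PySem.Set.ofList L1) := by
    refine hperm2.trans ?_
    refine (List.perm_ext_iff_of_nodup (PySem.Set.nodup_ofList L2) (PySem.Set.nodup_ofList L1)).mpr ?_
    intro a
    simp [PySem.Set.mem_ofList, hmem a]
  have hle : S2.Pairwise (fun a b => pvKey a ≤ pvKey b) := PySem.List.sorted_pairwise _ _
  have hshS : ∀ y ∈ S2, pvShape y := by
    intro y hy
    exact hsh y ((PySem.Set.mem_ofList _ _).mp (hperm2.mem_iff.mp hy))
  have hlt : S2.Pairwise (fun a b => pvKey a < pvKey b) := by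
    have hand := hle.and hnd2
    refine hand.imp_of_mem ?_
    intro a b ha hb ⟨h1, h2⟩
    exact lt_of_le_of_ne h1 (fun he => h2 (pvKey_inj (hshS a ha) (hshS b hb) he))
  exact PySem.List.sorted_eq_of_perm_of_pairwise_lt _ _ _ hperm hlt

theorem pv_main (ww_list : List (Option Int)) :
    get_w1w2_from_ww ww_list = get_w1w2_from_ww_alt ww_list := by
  unfold get_w1w2_from_ww get_w1w2_from_ww_alt
  have hmapeq : ww_list.reverse.foldl
      (fun (st : List (Option Int) × Option Int) ww =>
        let w : Option Int :=
          match ww with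
          | none => none
          | some v => if v = 90 then some 8 else if v < 30 then none else some (PySem.Int.floordiv v 10)
        (if st.2 ≠ w then st.1 ++ [w] else st.1, w)) ([], none)
      = (ww_list.reverse.map pvToW).foldl
        (fun (st : List (Option Int) × Option Int) w =>
          (if st.2 ≠ w then st.1 ++ [w] else st.1, w)) ([], none) := by
    rw [List.foldl_map]
    congr 1
    funext st ww
    rcases ww with _ | v
    · rfl
    · simp only [pvToW]
      by_cases h90 : v = 90
      · subst h90; norm_num
      · by_cases h30 : v < 30 <;> simp [h90, h30]
  rw [hmapeq]
  set ws := ww_list.reverse.map pvToW with hws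
  rw [pvFoldA]
  simp only [List.nil_append]
  have hsh : ∀ y ∈ ws, pvShape y := by
    intro y hy
    rw [hws] at hy
    rcases List.mem_map.mp hy with ⟨a, _, rfl⟩
    exact pvToW_shape a
  rw [pvRunDedup_eq]
  cases hdw : ws.dropWhile (fun x => x == none) with
  | nil => simp
  | cons w0 t =>
    simp only []
    have hsorted : PySem.List.sorted (PySem.Set.ofList ((w0 :: pvRunDedup w0 t).drop 1)) pvKey false
        = PySem.List.sorted (PySem.Set.ofList (t.dropWhile (fun x => x == w0))) pvKey false := by
      refine pvSorted_set_eq _ _ ?_ ?_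
      · intro y
        simpa using pvMem_runDedup t w0 y
      · intro y hy
        have hsub : y ∈ t := (List.dropWhile_sublist _).mem hy
        have ht : y ∈ ws := by
          have : y ∈ ws.dropWhile (fun x => x == none) := by rw [hdw]; exact List.mem_cons_of_mem _ hsub
          exact (List.dropWhile_sublist _).mem this
        exact hsh y ht
    rw [hsorted]
    set S := PySem.List.sorted (PySem.Set.ofList (t.dropWhile (fun x => x == w0))) pvKey false with hS
    cases hScases : S with
    | nil => simp
    | cons a tl =>
      cases tl with
      | nil =>
        simp [PySem.List.pyGet?, PySem.List.pyIdx?]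
      | cons b tl2 =>
        simp

-- ===== VERDICT (by name: the statement is the Claim_ definition above) =====
theorem get_w1w2_from_ww_spec : Claim_equal_get_w1w2_from_ww := by
  intro ww_list _
  unfold Spec_get_w1w2_from_ww
  exact pv_main ww_list
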